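-- pv_equiv track=rewrite | github.com/JollyRocketts/LeetCode | 1945-sum-of-digits-of-string-after-convert/1945-sum-of-digits-of-string-after-convert.py | getLucky
-- ===== SOURCE A (Python) =====
-- def getLucky(s: str, k: int) -> int:
--     tot = 0
--     temp = ""
--
--     for i in s:
--         temp += str(ord(i)-96)
--
--     for i in temp:
--         tot += int(i)
--
--     k -= 1
--
--     while k != 0:
--         temp = str(tot)
--         tot = 0
--
--         for i in temp:
--             tot += int(i)
--
--         k -= 1
--
--     return tot
-- ===== SOURCE B (Python) =====
-- def getLucky(s: str, k: int) -> int: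
--     # Single accumulator pass; the repeat loop stops as soon as the total is a
--     # single digit, since the digit sum is a fixpoint there (so at most a handful
--     # of iterations run regardless of k).
--     tot = 0
--     for c in s:
--         n = ord(c) - 96
--         while n > 0:
--             tot += n % 10
--             n //= 10
--     while k > 1 and tot > 9:
--         n, tot = tot, 0
--         while n > 0:
--             tot += n % 10
--             n //= 10
--         k -= 1
--     return tot
-- ===== Notes on version B (the rewrite author's own statement) =====
-- stated objective: faster
-- what changed: B accumulates all digit contributions arithmetically in one pass with no intermediate string, and its repeat loop exits as soon as the total is a single digit (a fixpoint of the digit sum), so it runs O(1) iterations instead of A's k-1 string/parse rounds.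
import Mathlib
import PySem

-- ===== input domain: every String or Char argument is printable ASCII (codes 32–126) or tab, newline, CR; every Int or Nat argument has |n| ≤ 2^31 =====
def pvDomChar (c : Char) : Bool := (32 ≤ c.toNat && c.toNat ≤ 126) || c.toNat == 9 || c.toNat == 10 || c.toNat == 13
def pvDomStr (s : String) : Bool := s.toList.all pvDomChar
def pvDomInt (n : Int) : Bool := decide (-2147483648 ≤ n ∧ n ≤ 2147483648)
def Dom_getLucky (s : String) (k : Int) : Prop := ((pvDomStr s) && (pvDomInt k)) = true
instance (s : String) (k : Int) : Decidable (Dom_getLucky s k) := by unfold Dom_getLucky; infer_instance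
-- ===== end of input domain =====

-- B fuses the digit work into one arithmetic accumulator pass and exits the repeat loop once the total is a single digit (a fixpoint of the digit sum), avoiding A's k-1 string round-trips (objective: faster when k is large).


-- ===== PORT A =====
-- int(i) for a single char i; Python raises ValueError on a non-digit char — those inputs are outside Pre_.
def pyCharInt (c : Char) : Int := (PySem.Int.ofStr? (String.ofList [c])).getD 0

-- the `while k != 0:` loop after `k -= 1`; for k ≤ 0 Python diverges (outside Pre_), ported as (k-1).toNat iterations
def getLuckyLoop (tot : Int) : Nat → Int
  | 0 => tot
  | m + 1 => getLuckyLoop ((PySem.Int.toChars tot).foldl (fun a c => a + pyCharInt c) 0) m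

def getLucky (s : String) (k : Int) : Int :=
  -- temp += str(ord(i)-96), kept as List Char (exact: Python string concatenation of str(...) pieces)
  let temp : List Char := s.toList.foldl (fun t c => t ++ PySem.Int.toChars ((c.toNat : Int) - 96)) []
  let tot : Int := temp.foldl (fun a c => a + pyCharInt c) 0
  getLuckyLoop tot (k - 1).toNat

-- ===== PORT B =====
-- inner `while n > 0: tot += n % 10; n //= 10` of Source B
def addDigits (tot n : Int) : Int :=
  if 0 < n then addDigits (tot + PySem.Int.mod n 10) (PySem.Int.floordiv n 10) else tot
termination_by n.toNat
decreasing_by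
  rw [PySem.Int.floordiv_eq_ediv_of_pos (by omega : (0:Int) < 10)]
  omega

-- outer `while k > 1 and tot > 9:` of Source B; it counts k down, and in practice
-- exits after O(1) rounds because a single-digit total fails the guard
def tailB (tot k : Int) : Int :=
  if 1 < k ∧ 9 < tot then tailB (addDigits 0 tot) (k - 1) else tot
termination_by (k - 1).toNat
decreasing_by omega

def getLucky_alt (s : String) (k : Int) : Int :=
  tailB (s.toList.foldl (fun tot c => addDigits tot ((c.toNat : Int) - 96)) 0) k

-- ===== PRECONDITION & SPEC =====
-- Pre_ excludes exactly the inputs where Python A does not return: a char below '`' (code < 96) makes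
-- int() raise ValueError on the '-' of a negative str(), and k ≤ 0 makes the `while k != 0` loop diverge.
def Pre_getLucky (s : String) (k : Int) : Prop := 1 ≤ k ∧ s.toList.all (fun c => 96 ≤ c.toNat) = true
instance (s : String) (k : Int) : Decidable (Pre_getLucky s k) := by unfold Pre_getLucky; infer_instance
def pvWitness_getLucky : String × Int := ("zbax", 2)

def Spec_getLucky (s : String) (k : Int) (out : Int) : Prop := out = getLucky_alt s k
instance (s : String) (k : Int) (out : Int) : Decidable (Spec_getLucky s k out) := by unfold Spec_getLucky; infer_instance

-- ===== CLAIM (what is proved, stated in full; the proofs are below) =====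
def Claim_equal_getLucky : Prop := ∀ (s : String) (k : Int), Dom_getLucky s k → Pre_getLucky s k → Spec_getLucky s k (getLucky s k)

-- ===== LEMMAS AND PROOFS =====

-- proof-level digit sum: the common value of A's string digit sum and one run of B's inner while
def dsumB (n : Int) : Int :=
  if 0 < n then PySem.Int.mod n 10 + dsumB (PySem.Int.floordiv n 10) else 0
termination_by n.toNat
decreasing_by
  rw [PySem.Int.floordiv_eq_ediv_of_pos (by omega : (0:Int) < 10)]
  omega

lemma addDigits_eq (n : Int) : ∀ tot : Int, addDigits tot n = tot + dsumB n := by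
  induction hn : n.toNat using Nat.strong_induction_on generalizing n with
  | _ m ih =>
    intro tot
    rw [addDigits, dsumB]
    split_ifs with h
    · rw [ih (PySem.Int.floordiv n 10).toNat
        (by rw [PySem.Int.floordiv_eq_ediv_of_pos (by omega : (0:Int) < 10)]; omega) _ rfl]
      ring
    · ring

-- digit sum of a Nat by repeated /10
def sdN : Nat → Nat
  | 0 => 0
  | n + 1 => (n + 1) % 10 + sdN ((n + 1) / 10)
decreasing_by omega

lemma sdN_eq (n : Nat) (h : 0 < n) : sdN n = n % 10 + sdN (n / 10) := by
  cases n with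
  | zero => omega
  | succ m => rw [sdN]

lemma pyCharInt_digitChar : ∀ d, d < 10 → pyCharInt (Nat.digitChar d) = (d : Int) := by decide

lemma dsumB_nonneg (n : Int) : 0 ≤ dsumB n := by
  rw [dsumB]
  split_ifs with h
  · have := PySem.Int.mod_nonneg n (by omega : (0:Int) < 10)
    have := dsumB_nonneg (PySem.Int.floordiv n 10)
    omega
  · omega
termination_by n.toNat
decreasing_by
  rw [PySem.Int.floordiv_eq_ediv_of_pos (by omega : (0:Int) < 10)]
  omega

lemma dsumB_natCast (m : Nat) : dsumB (m : Int) = (sdN m : Int) := by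
  induction m using Nat.strong_induction_on with
  | _ m ih =>
    rw [dsumB]
    split_ifs with h
    · have hm : 0 < m := by exact_mod_cast h
      rw [PySem.Int.mod_eq_emod_of_pos (by omega : (0:Int) < 10),
          PySem.Int.floordiv_eq_ediv_of_pos (by omega : (0:Int) < 10)]
      have h1 : ((m : Int)) % 10 = ((m % 10 : Nat) : Int) := by push_cast; ring_nf
      have h2 : ((m : Int)) / 10 = ((m / 10 : Nat) : Int) := by push_cast; ring_nf
      rw [h1, h2, ih (m / 10) (by omega), sdN_eq m hm]
      push_cast; ring
    · have hm : m = 0 := by omega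
      simp [hm, sdN]

lemma dsumB_small (n : Int) (h0 : 0 ≤ n) (h9 : n ≤ 9) : dsumB n = n := by
  rw [dsumB]
  split_ifs with h
  · rw [PySem.Int.mod_eq_emod_of_pos (by omega : (0:Int) < 10),
        PySem.Int.floordiv_eq_ediv_of_pos (by omega : (0:Int) < 10)]
    have hd : n / 10 = 0 := by omega
    have hm : n % 10 = n := by omega
    rw [hd, hm]
    have : dsumB 0 = 0 := by rw [dsumB]; simp
    rw [this]; ring
  · omega

-- character digit sum of a list, as a mapped sum
def csum (l : List Char) : Int := (l.map pyCharInt).sum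

lemma csum_append (l₁ l₂ : List Char) : csum (l₁ ++ l₂) = csum l₁ + csum l₂ := by
  simp [csum]

-- core: summing the digit characters produced by Nat.toDigitsCore gives sdN
lemma csum_toDigitsCore : ∀ fuel n ds, n < fuel →
    csum (Nat.toDigitsCore 10 fuel n ds) = (sdN n : Int) + csum ds := by
  intro fuel
  induction fuel with
  | zero => intro n ds h; omega
  | succ fuel ih =>
    intro n ds h
    show csum (if n / 10 = 0 then (n % 10).digitChar :: ds
               else Nat.toDigitsCore 10 fuel (n / 10) ((n % 10).digitChar :: ds)) = _
    by_cases h0 : n / 10 = 0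
    · rw [if_pos h0]
      have hd := pyCharInt_digitChar (n % 10) (by omega)
      rcases Nat.eq_zero_or_pos n with hn | hn
      · simp [hn, csum, sdN, pyCharInt_digitChar 0 (by omega)]
      · rw [sdN_eq n hn, h0]
        simp only [csum, List.map_cons, List.sum_cons, hd, sdN]
        push_cast; ring
    · rw [if_neg h0]
      rw [ih (n / 10) _ (by omega)]
      rcases Nat.eq_zero_or_pos n with hn | hn
      · omega
      · rw [sdN_eq n hn]
        have hd := pyCharInt_digitChar (n % 10) (by omega)
        simp only [csum, List.map_cons, List.sum_cons, hd]
        push_cast; ring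

lemma csum_toChars (n : Int) (h : 0 ≤ n) : csum (PySem.Int.toChars n) = dsumB n := by
  have : PySem.Int.toChars n = Nat.toDigits 10 n.toNat := by
    simp [PySem.Int.toChars]
    omega
  rw [this, Nat.toDigits, csum_toDigitsCore (n.toNat + 1) n.toNat [] (by omega)]
  simp [csum]
  rw [← dsumB_natCast n.toNat]
  congr 1
  omega

-- A's digit-char fold equals csum
lemma foldl_csum (l : List Char) (a : Int) :
    l.foldl (fun a c => a + pyCharInt c) a = a + csum l := by
  simpa [csum] using PySem.List.foldl_add l pyCharInt a

-- first pass: A's concatenated temp summed equals the per-char arithmetic digit sums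
lemma first_pass (cs : List Char) (hcs : ∀ c ∈ cs, 96 ≤ c.toNat) : ∀ t : List Char,
    csum (cs.foldl (fun t c => t ++ PySem.Int.toChars ((c.toNat : Int) - 96)) t)
      = csum t + (cs.map (fun c => dsumB ((c.toNat : Int) - 96))).sum := by
  induction cs with
  | nil => intro t; simp
  | cons c cs ih =>
    intro t
    have hc : 96 ≤ c.toNat := hcs c (by simp)
    simp only [List.foldl_cons, List.map_cons, List.sum_cons]
    have hc' : (96 : Int) ≤ (c.toNat : Int) := by exact_mod_cast hc
    rw [ih (fun c hc => hcs c (by simp [hc])), csum_append,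
        csum_toChars _ (by omega)]
    ring

lemma sum_dsum_nonneg (cs : List Char) :
    0 ≤ (cs.map (fun c => dsumB ((c.toNat : Int) - 96))).sum := by
  induction cs with
  | nil => simp
  | cons c cs ih =>
    simp only [List.map_cons, List.sum_cons]
    have := dsumB_nonneg ((c.toNat : Int) - 96)
    omega

-- a single-digit total is a fixpoint of A's repeat loop
lemma loopA_fix (tot : Int) (h0 : 0 ≤ tot) (h9 : tot ≤ 9) :
    ∀ m, getLuckyLoop tot m = tot := by
  intro m
  induction m with
  | zero => rfl
  | succ m ih =>
    rw [getLuckyLoop, foldl_csum, csum_toChars tot h0, zero_add, dsumB_small tot h0 h9]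
    exact ih

-- the repeat loops agree: A iterates exactly m = (k-1).toNat times, B stops at the fixpoint
lemma loop_eq : ∀ (m : Nat) (tot : Int), 0 ≤ tot →
    getLuckyLoop tot m = tailB tot ((m : Int) + 1) := by
  intro m
  induction m with
  | zero =>
    intro tot _
    rw [getLuckyLoop, tailB]
    simp
  | succ m ih =>
    intro tot ht
    rw [getLuckyLoop, foldl_csum, csum_toChars tot ht, zero_add, tailB]
    by_cases h9 : 9 < tot
    · rw [if_pos ⟨by push_cast; omega, h9⟩]
      have hcast : ((m + 1 : Nat) : Int) + 1 - 1 = (m : Int) + 1 := by push_cast; ring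
      rw [hcast, addDigits_eq, zero_add]
      exact ih (dsumB tot) (dsumB_nonneg tot)
    · rw [if_neg (by push_cast; omega)]
      rw [dsumB_small tot ht (by omega)]
      exact loopA_fix tot ht (by omega) m

-- B's first fold as a per-char sum
lemma foldB_eq (cs : List Char) :
    cs.foldl (fun tot c => addDigits tot ((c.toNat : Int) - 96)) 0
      = (cs.map (fun c => dsumB ((c.toNat : Int) - 96))).sum := by
  have h : ∀ a : Int, cs.foldl (fun tot c => addDigits tot ((c.toNat : Int) - 96)) a
      = a + (cs.map (fun c => dsumB ((c.toNat : Int) - 96))).sum := by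
    intro a
    have := PySem.List.foldl_add cs (fun c => dsumB ((c.toNat : Int) - 96)) a
    rw [← this]
    congr 1
    funext b c
    exact addDigits_eq _ _
  simpa using h 0

-- ===== VERDICT (by name: the statement is the Claim_ definition above) =====
theorem getLucky_spec : Claim_equal_getLucky := by
  intro s k _ hpre
  have hchars : ∀ c ∈ s.toList, 96 ≤ c.toNat := by simpa using hpre.2
  unfold Spec_getLucky
  simp only [getLucky, getLucky_alt]
  rw [foldl_csum, first_pass s.toList hchars [], foldB_eq]
  simp only [csum, List.map_nil, List.sum_nil, zero_add]
  have hk : ((((k : Int) - 1).toNat : Int) + 1) = k := by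
    have := hpre.1; omega
  rw [loop_eq _ _ (sum_dsum_nonneg s.toList), hk]
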